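-- pv_equiv track=rewrite | github.com/pection-zz/aboutme | InternshipProject/trackHand/Image_Proces.py | FindRightPoint
-- ===== SOURCE A (Python) =====
-- def FindRightPoint(dataHullx,dataHully,datax,datay):
--     LastPointx,LastPointy,maxdatax,maxdatay=list(),list(),list(),list()
--     assert len(datax) == len(datay)
--     assert len(dataHullx) == len(dataHully)
--     for y in range(0,len(dataHully)):
--         for i in range(0,len(datay)):
--             if abs(dataHully[y] -datay[i])<=20:
--                 maxdatax.append(datax[i])
--                 maxdatay.append(datay[i])
--         index = maxdatax.index(max(maxdatax))
--         LastPointx.append(maxdatax[index])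
--         LastPointy.append(maxdatay[index])
--         maxdatax,maxdatay =[],[]
--     return LastPointx,LastPointy
-- ===== SOURCE B (Python) =====
-- def FindRightPoint(dataHullx, dataHully, datax, datay):
--     # One pass per hull point tracking the running best (x, y) pair directly:
--     # no temporary lists, no max()/.index() re-scans.
--     assert len(datax) == len(datay)
--     assert len(dataHullx) == len(dataHully)
--     pts = list(zip(datax, datay))
--     LastPointx, LastPointy = [], []
--     for hy in dataHully:
--         best = None
--         for p in pts:
--             if abs(hy - p[1]) <= 20 and (best is None or p[0] > best[0]):
--                 best = p
--         if best is not None: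
--             LastPointx.append(best[0])
--             LastPointy.append(best[1])
--     return LastPointx, LastPointy
-- ===== Notes on version B (the rewrite author's own statement) =====
-- stated objective: simpler
-- what changed: Instead of building temporary filtered x/y lists per hull point and re-scanning them with max() and .index(), B zips the data once and keeps a single running best (x,y) pair per hull point in one pass.
import Mathlib
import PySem

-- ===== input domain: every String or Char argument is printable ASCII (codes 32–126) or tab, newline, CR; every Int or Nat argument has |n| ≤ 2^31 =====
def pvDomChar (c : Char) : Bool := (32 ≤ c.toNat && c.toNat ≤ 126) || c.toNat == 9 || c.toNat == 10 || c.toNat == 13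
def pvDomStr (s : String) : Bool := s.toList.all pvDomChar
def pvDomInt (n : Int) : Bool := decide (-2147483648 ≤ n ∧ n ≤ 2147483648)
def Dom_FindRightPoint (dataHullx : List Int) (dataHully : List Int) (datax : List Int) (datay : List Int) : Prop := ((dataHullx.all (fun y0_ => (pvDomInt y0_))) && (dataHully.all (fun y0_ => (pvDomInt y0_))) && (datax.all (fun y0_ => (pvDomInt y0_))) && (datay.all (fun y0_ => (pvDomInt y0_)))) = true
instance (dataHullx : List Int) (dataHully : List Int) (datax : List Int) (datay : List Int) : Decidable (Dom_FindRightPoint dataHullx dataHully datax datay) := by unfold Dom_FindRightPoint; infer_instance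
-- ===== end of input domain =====

-- B replaces A's per-hull-point temporary lists plus max()/.index() re-scans by a single
-- running-best pass over the zipped data (objective: simpler; return value only).

-- ===== PORT A =====
-- A's body for one hull y-value: the inner filtering loop, then max/.index extraction.
def frpRow (datax : List Int) (datay : List Int) (st : List Int × List Int) (hy : Int) : List Int × List Int :=
  let md := (PySem.List.pyRange 0 (datay.length : Int) 1).foldl (fun (md : List Int × List Int) i =>
      if |hy - PySem.List.pyGetD datay i 0| ≤ 20 then
        (md.1 ++ [PySem.List.pyGetD datax i 0], md.2 ++ [PySem.List.pyGetD datay i 0])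
      else md) ([], [])
  match PySem.List.max? md.1 (fun v => v) with
  | none => st                                  -- Python: max([]) raises ValueError (outside Pre_)
  | some m =>
    match PySem.List.index? md.1 m with
    | none => st                                -- unreachable: max? returns a member
    | some idx => (st.1 ++ [PySem.List.pyGetD md.1 (idx : Int) 0], st.2 ++ [PySem.List.pyGetD md.2 (idx : Int) 0])

def FindRightPoint (dataHullx : List Int) (dataHully : List Int) (datax : List Int) (datay : List Int) : List Int × List Int :=
  (PySem.List.pyRange 0 (dataHully.length : Int) 1).foldl
    (fun st y => frpRow datax datay st (PySem.List.pyGetD dataHully y 0)) ([], [])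

-- ===== PORT B =====
-- running best (x, y) pair among data points whose y is within 20 of hy
def frpBest (hy : Int) (pts : List (Int × Int)) : Option (Int × Int) :=
  pts.foldl (fun best p =>
    match best with
    | none => if |hy - p.2| ≤ 20 then some p else none
    | some b => if |hy - p.2| ≤ 20 ∧ b.1 < p.1 then some p else some b) none

def FindRightPoint_alt (dataHullx : List Int) (dataHully : List Int) (datax : List Int) (datay : List Int) : List Int × List Int :=
  let pts := datax.zip datay
  dataHully.foldl (fun st hy =>
    match frpBest hy pts with
    | none => st
    | some q => (st.1 ++ [q.1], st.2 ++ [q.2])) ([], [])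

-- ===== PRECONDITION & SPEC =====
-- Pre_ excludes exactly the inputs where Python A raises: the two length asserts, and the
-- ValueError from max([]) when some hull y has no data y within distance 20.
def Pre_FindRightPoint (dataHullx : List Int) (dataHully : List Int) (datax : List Int) (datay : List Int) : Prop :=
  datax.length = datay.length ∧ dataHullx.length = dataHully.length ∧
  ∀ hy ∈ dataHully, ∃ yy ∈ datay, |hy - yy| ≤ 20
instance (dataHullx : List Int) (dataHully : List Int) (datax : List Int) (datay : List Int) : Decidable (Pre_FindRightPoint dataHullx dataHully datax datay) := by unfold Pre_FindRightPoint; infer_instance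

def pvWitness_FindRightPoint : List Int × List Int × List Int × List Int := ([7, 8], [10, 30], [1, 2, 3], [0, 25, 40])

def Spec_FindRightPoint (dataHullx : List Int) (dataHully : List Int) (datax : List Int) (datay : List Int) (out : List Int × List Int) : Prop := out = FindRightPoint_alt dataHullx dataHully datax datay
instance (dataHullx : List Int) (dataHully : List Int) (datax : List Int) (datay : List Int) (out : List Int × List Int) : Decidable (Spec_FindRightPoint dataHullx dataHully datax datay out) := by unfold Spec_FindRightPoint; infer_instance

-- ===== CLAIM (what is proved, stated in full; the proofs are below) =====
def Claim_equal_FindRightPoint : Prop := ∀ (dataHullx : List Int) (dataHully : List Int) (datax : List Int) (datay : List Int), Dom_FindRightPoint dataHullx dataHully datax datay → Pre_FindRightPoint dataHullx dataHully datax datay → Spec_FindRightPoint dataHullx dataHully datax datay (FindRightPoint dataHullx dataHully datax datay)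

-- ===== LEMMAS AND PROOFS =====

-- the B-side running best, with an explicit accumulator, restricted to already-filtered pairs
def frpPick (t : List (Int × Int)) (p : Int × Int) : Int × Int :=
  t.foldl (fun b x => if b.1 < x.1 then x else b) p

lemma frpPick_cons (x : Int × Int) (t : List (Int × Int)) (p : Int × Int) :
    frpPick (x :: t) p = frpPick t (if p.1 < x.1 then x else p) := by
  simp [frpPick]

lemma frpPick_fst_le (t : List (Int × Int)) (p : Int × Int) : p.1 ≤ (frpPick t p).1 := by
  induction t generalizing p with
  | nil => simp [frpPick]
  | cons x t ih =>
    by_cases hc : p.1 < x.1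
    · have h := ih x
      simp only [frpPick, List.foldl_cons, if_pos hc] at h ⊢
      omega
    · have h := ih p
      simp only [frpPick, List.foldl_cons, if_neg hc] at h ⊢
      exact h

lemma frpPick_fst (t : List (Int × Int)) (p : Int × Int) :
    (frpPick t p).1 = (t.map Prod.fst).foldl max p.1 := by
  induction t generalizing p with
  | nil => simp [frpPick]
  | cons x t ih =>
    have h := ih (if p.1 < x.1 then x else p)
    simp only [frpPick, List.foldl_cons, List.map_cons] at h ⊢
    rw [h]
    congr 1
    rw [max_def]
    split <;> split <;> simp_all <;> omega

lemma frpPick_decomp (t : List (Int × Int)) (p : Int × Int) :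
    ∃ pre suf, p :: t = pre ++ frpPick t p :: suf ∧ ∀ r ∈ pre, r.1 < (frpPick t p).1 := by
  induction t generalizing p with
  | nil => exact ⟨[], [], by simp [frpPick], by simp⟩
  | cons x t ih =>
    rw [frpPick_cons]
    by_cases hc : p.1 < x.1
    · rw [if_pos hc]
      obtain ⟨pre, suf, heq, hlt⟩ := ih x
      have hle := frpPick_fst_le t x
      refine ⟨p :: pre, suf, by rw [List.cons_append, ← heq], ?_⟩
      intro r hr
      rcases List.mem_cons.mp hr with h | h
      · subst h; omega
      · exact hlt r h
    · rw [if_neg hc]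
      obtain ⟨pre, suf, heq, hlt⟩ := ih p
      cases pre with
      | nil =>
        simp only [List.nil_append] at heq
        obtain ⟨h1, h2⟩ := List.cons_eq_cons.mp heq
        exact ⟨[], x :: t, by rw [List.nil_append, ← h1], by simp⟩
      | cons a pre₂ =>
        simp only [List.cons_append] at heq
        obtain ⟨h1, h2⟩ := List.cons_eq_cons.mp heq
        refine ⟨p :: x :: pre₂, suf, by rw [List.cons_append, List.cons_append, ← h2], ?_⟩
        have hp : p.1 < (frpPick t p).1 := h1 ▸ hlt a (List.mem_cons_self ..)

        intro r hr
        rcases List.mem_cons.mp hr with h | h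
        · subst h; omega
        rcases List.mem_cons.mp h with h | h
        · subst h; omega
        · exact hlt r (List.mem_cons_of_mem _ h)

-- B's fold with accumulator `some b` is frpPick
lemma frpBest_acc (hy : Int) (t : List (Int × Int)) (b : Int × Int)
    (ht : ∀ p ∈ t, |hy - p.2| ≤ 20) :
    t.foldl (fun best p =>
      match best with
      | none => if |hy - p.2| ≤ 20 then some p else none
      | some b => if |hy - p.2| ≤ 20 ∧ b.1 < p.1 then some p else some b) (some b)
      = some (frpPick t b) := by
  induction t generalizing b with
  | nil => simp [frpPick]
  | cons x t ih =>
    have hx : |hy - x.2| ≤ 20 := ht x (List.mem_cons_self ..)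
    rw [List.foldl_cons, frpPick_cons]
    have step : (match some b with
        | none => if |hy - x.2| ≤ 20 then some x else none
        | some b => if |hy - x.2| ≤ 20 ∧ b.1 < x.1 then some x else some b)
        = some (if b.1 < x.1 then x else b) := by
      by_cases hb : b.1 < x.1
      · simp [hx, hb]
      · simp [hx, hb]
    rw [step]
    exact ih _ (fun p hp => ht p (List.mem_cons_of_mem _ hp))

-- B's fold over the raw pairs equals its fold over the filtered pairs
lemma frpBest_filter (hy : Int) (l : List (Int × Int)) :
    frpBest hy l =
      match l.filter (fun p => decide (|hy - p.2| ≤ 20)) with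
      | [] => none
      | p :: t => some (frpPick t p) := by
  have congr_filter : ∀ (l : List (Int × Int)) (acc : Option (Int × Int)),
      l.foldl (fun best p =>
        match best with
        | none => if |hy - p.2| ≤ 20 then some p else none
        | some b => if |hy - p.2| ≤ 20 ∧ b.1 < p.1 then some p else some b) acc
      = (l.filter (fun p => decide (|hy - p.2| ≤ 20))).foldl (fun best p =>
        match best with
        | none => if |hy - p.2| ≤ 20 then some p else none
        | some b => if |hy - p.2| ≤ 20 ∧ b.1 < p.1 then some p else some b) acc := by
    intro l
    induction l with
    | nil => intro acc; rfl
    | cons x l ih =>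
      intro acc
      by_cases hx : |hy - x.2| ≤ 20
      · rw [List.foldl_cons, List.filter_cons_of_pos (by simpa using hx), List.foldl_cons, ih]
      · rw [List.foldl_cons, List.filter_cons_of_neg (by simpa using hx)]
        have : (match acc with
            | none => if |hy - x.2| ≤ 20 then some x else none
            | some b => if |hy - x.2| ≤ 20 ∧ b.1 < x.1 then some x else some b) = acc := by
          cases acc <;> simp [hx]
        rw [this, ih]
  rw [frpBest, congr_filter]
  cases hf : l.filter (fun p => decide (|hy - p.2| ≤ 20)) with
  | nil => rfl
  | cons p t =>
    have hmem : ∀ q ∈ p :: t, |hy - q.2| ≤ 20 := by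
      intro q hq
      have := List.of_mem_filter (hf ▸ hq)
      simpa using this
    have hp : |hy - p.2| ≤ 20 := hmem p (List.mem_cons_self ..)
    rw [List.foldl_cons]
    have step : (match (none : Option (Int × Int)) with
        | none => if |hy - p.2| ≤ 20 then some p else none
        | some b => if |hy - p.2| ≤ 20 ∧ b.1 < p.1 then some p else some b) = some p := by
      simp [hp]
    rw [step]
    exact frpBest_acc hy t p (fun q hq => hmem q (List.mem_cons_of_mem _ hq))

-- A's inner loop over zipped pairs builds the two filtered projections
lemma inner_filter (hy : Int) (l : List (Int × Int)) (ax ay : List Int) :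
    l.foldl (fun (md : List Int × List Int) p =>
        if |hy - p.2| ≤ 20 then (md.1 ++ [p.1], md.2 ++ [p.2]) else md) (ax, ay)
      = (ax ++ (l.filter (fun p => decide (|hy - p.2| ≤ 20))).map Prod.fst,
         ay ++ (l.filter (fun p => decide (|hy - p.2| ≤ 20))).map Prod.snd) := by
  induction l generalizing ax ay with
  | nil => simp
  | cons x l ih =>
    by_cases hx : |hy - x.2| ≤ 20
    · rw [List.foldl_cons, List.filter_cons_of_pos (by simpa using hx)]
      simp only [hx, if_pos]
      rw [ih]
      simp
    · rw [List.foldl_cons, List.filter_cons_of_neg (by simpa using hx)]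
      simp only [hx, ite_false]
      exact ih ax ay

-- A's max/.index extraction on a nonempty filtered list picks exactly frpPick
lemma row_extract (st : List Int × List Int) (p : Int × Int) (t : List (Int × Int)) :
    (match PySem.List.max? ((p :: t).map Prod.fst) (fun v => v) with
     | none => st
     | some m =>
       match PySem.List.index? ((p :: t).map Prod.fst) m with
       | none => st
       | some idx => (st.1 ++ [PySem.List.pyGetD ((p :: t).map Prod.fst) (idx : Int) 0],
                      st.2 ++ [PySem.List.pyGetD ((p :: t).map Prod.snd) (idx : Int) 0]))
    = (st.1 ++ [(frpPick t p).1], st.2 ++ [(frpPick t p).2]) := by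
  obtain ⟨pre, suf, heq, hlt⟩ := frpPick_decomp t p
  have hmax : PySem.List.max? ((p :: t).map Prod.fst) (fun v => v) = some (frpPick t p).1 := by
    rw [List.map_cons, PySem.List.max?_id_cons, ← frpPick_fst]
  rw [hmax]
  have hxs : (p :: t).map Prod.fst = pre.map Prod.fst ++ (frpPick t p).1 :: suf.map Prod.fst := by
    rw [heq]; simp
  have hys : (p :: t).map Prod.snd = pre.map Prod.snd ++ (frpPick t p).2 :: suf.map Prod.snd := by
    rw [heq]; simp
  have hnot : (frpPick t p).1 ∉ pre.map Prod.fst := by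
    intro hmem
    obtain ⟨r, hr, hre⟩ := List.mem_map.mp hmem
    exact absurd hre (ne_of_lt (hlt r hr))
  have hidx : PySem.List.index? ((p :: t).map Prod.fst) (frpPick t p).1 = some pre.length := by
    rw [PySem.List.index?_eq_some_iff]
    exact ⟨pre.map Prod.fst, suf.map Prod.fst, hxs, by simp, hnot⟩
  dsimp only
  rw [hidx]
  dsimp only
  rw [PySem.List.pyGetD_natCast, PySem.List.pyGetD_natCast, hxs, hys]
  have h1 : (pre.map Prod.fst ++ (frpPick t p).1 :: suf.map Prod.fst).getD pre.length 0
      = (frpPick t p).1 := by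
    rw [List.getD_eq_getElem?_getD, List.getElem?_append_right (by simp)]
    simp
  have h2 : (pre.map Prod.snd ++ (frpPick t p).2 :: suf.map Prod.snd).getD pre.length 0
      = (frpPick t p).2 := by
    rw [List.getD_eq_getElem?_getD, List.getElem?_append_right (by simp)]
    simp
  rw [h1, h2]

-- the per-hull-point bodies agree when the two data lists have equal length
lemma row_eq (datax datay : List Int) (hlen : datax.length = datay.length)
    (st : List Int × List Int) (hy : Int) :
    frpRow datax datay st hy =
      match frpBest hy (datax.zip datay) with
      | none => st
      | some q => (st.1 ++ [q.1], st.2 ++ [q.2]) := by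
  have hpts : (datax.zip datay).length = datay.length := by
    rw [List.length_zip, hlen, min_self]
  have hbody : (PySem.List.pyRange 0 (datay.length : Int) 1).foldl (fun (md : List Int × List Int) i =>
      if |hy - PySem.List.pyGetD datay i 0| ≤ 20 then
        (md.1 ++ [PySem.List.pyGetD datax i 0], md.2 ++ [PySem.List.pyGetD datay i 0])
      else md) ([], [])
      = (datax.zip datay).foldl (fun (md : List Int × List Int) p =>
        if |hy - p.2| ≤ 20 then (md.1 ++ [p.1], md.2 ++ [p.2]) else md) ([], []) := by
    rw [PySem.List.foldl_congr_mem (g := fun (md : List Int × List Int) i =>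
      (fun (md : List Int × List Int) (p : Int × Int) =>
        if |hy - p.2| ≤ 20 then (md.1 ++ [p.1], md.2 ++ [p.2]) else md) md
        (PySem.List.pyGetD (datax.zip datay) i (0, 0)))]
    · rw [← hpts]
      exact PySem.List.foldl_pyRange_zero_pyGetD' (datax.zip datay) (0, 0)
        (fun (md : List Int × List Int) (p : Int × Int) =>
          if |hy - p.2| ≤ 20 then (md.1 ++ [p.1], md.2 ++ [p.2]) else md) ([], [])
    · intro md i hi
      obtain ⟨h0, hn⟩ := (PySem.List.mem_pyRange_one).mp hi
      have hiy : i < (datay.length : Int) := hn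
      have hix : i < (datax.length : Int) := by omega
      have hip : i < ((datax.zip datay).length : Int) := by rw [hpts]; exact hn
      rw [PySem.List.pyGetD_eq_getElem (datax.zip datay) (0, 0) h0 hip,
          PySem.List.pyGetD_eq_getElem datax 0 h0 hix,
          PySem.List.pyGetD_eq_getElem datay 0 h0 hiy]
      simp [List.getElem_zip]
  unfold frpRow
  rw [hbody, inner_filter, List.nil_append, List.nil_append,
      frpBest_filter]
  cases hf : (datax.zip datay).filter (fun p => decide (|hy - p.2| ≤ 20)) with
  | nil => rfl
  | cons p t => exact row_extract st p t

-- ===== VERDICT (by name: the statement is the Claim_ definition above) =====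
theorem FindRightPoint_spec : Claim_equal_FindRightPoint := by
  intro dataHullx dataHully datax datay _ hpre
  obtain ⟨hlen, _, _⟩ := hpre
  unfold Spec_FindRightPoint FindRightPoint FindRightPoint_alt
  rw [PySem.List.foldl_pyRange_zero_pyGetD' dataHully 0 (frpRow datax datay) ([], [])]
  have hfun : frpRow datax datay = (fun (st : List Int × List Int) hy =>
      match frpBest hy (datax.zip datay) with
      | none => st
      | some q => (st.1 ++ [q.1], st.2 ++ [q.2])) :=
    funext fun st => funext fun hy => row_eq datax datay hlen st hy
  rw [hfun]
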